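-- pv_equiv track=rewrite | github.com/christiankrug/pohlig_hellman | main.py | calculate_subgrp_congruences
-- ===== SOURCE A (Python) =====
-- p = 11805217175667888115840516101006175607012549121531103
--
-- alpha = 5
--
-- q = 11805217175667888115840516101006175607012549121531102
--
-- beta = 4032711556121367277019211297170761294880287059585401
--
-- def sqm(a, b, n):
--     res = 1
--     binarray = [int(x) for x in bin(int(b))[2:]]
--     for i in binarray:
--         if i == 1:
--             res = (res * res * a) % n
--         else:
--             res = (res * res) % n
--     return res
--
-- def calculate_subgrp_congruences(pub, pi):
--     gi = sqm(alpha, q // pi, p)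
--     hi = sqm(beta, q // pi, p)
--     # we are looking for: gi ^ di = hi mod p (di is the unknown)
--     c = 1
--     while c < p:
--         if sqm(gi, c, p) % p == hi % p:
--             return c
--         c += 1
--     return -1
-- ===== SOURCE B (Python) =====
-- p = 11805217175667888115840516101006175607012549121531103
--
-- alpha = 5
--
-- q = 11805217175667888115840516101006175607012549121531102
--
-- beta = 4032711556121367277019211297170761294880287059585401
--
-- def modpow(b, e, m):
--     # LSB-first square-and-multiply (no string round-trip through bin())
--     b %= m
--     r = 1
--     while e > 0:
--         if e % 2 == 1:
--             r = r * b % m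
--         b = b * b % m
--         e //= 2
--     return r
--
-- def calculate_subgrp_congruences(pub, pi):
--     e = q // pi
--     gi = modpow(alpha, e, p)
--     hi = modpow(beta, e, p)
--     # scan exponents with a running power: r == gi^c (mod p) throughout,
--     # one modular multiplication per candidate instead of a full
--     # square-and-multiply exponentiation per candidate
--     r = gi
--     c = 1
--     while c < p:
--         if r == hi:
--             return c
--         r = r * gi % p
--         c += 1
--     return -1
-- ===== Notes on version B (the rewrite author's own statement) =====
-- stated objective: faster
-- what changed: B scans candidate exponents with a single running power r = gi^c maintained by one modular multiplication per step, instead of recomputing a full square-and-multiply exponentiation sqm(gi, c, p) for every candidate c.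
import Mathlib
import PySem

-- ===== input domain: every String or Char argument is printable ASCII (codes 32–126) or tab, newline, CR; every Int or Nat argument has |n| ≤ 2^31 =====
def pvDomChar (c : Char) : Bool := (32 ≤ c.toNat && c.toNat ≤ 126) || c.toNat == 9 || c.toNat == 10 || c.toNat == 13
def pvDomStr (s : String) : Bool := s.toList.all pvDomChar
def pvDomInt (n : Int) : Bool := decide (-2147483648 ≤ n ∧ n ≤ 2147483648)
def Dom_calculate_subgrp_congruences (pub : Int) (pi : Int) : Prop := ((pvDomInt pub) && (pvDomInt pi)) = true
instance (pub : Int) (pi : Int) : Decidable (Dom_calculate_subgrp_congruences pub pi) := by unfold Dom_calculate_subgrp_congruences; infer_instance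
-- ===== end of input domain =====

-- B replaces A's per-candidate square-and-multiply exponentiation by a single running power
-- (one modular multiplication per candidate): O(d) instead of O(d log d) multiplications.

-- ===== PORT A =====
-- module constants
def pvP : Int := 11805217175667888115840516101006175607012549121531103
def pvAlpha : Int := 5
def pvQ : Int := 11805217175667888115840516101006175607012549121531102
def pvBeta : Int := 4032711556121367277019211297170761294880287059585401

-- bin(n)[2:] as a list of 0/1 digits, MSB first (exact for n ≥ 0; A only calls it there)
def pvBinDigits (n : Nat) : List Nat :=
  if n = 0 then [] else pvBinDigits (n / 2) ++ [n % 2]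
termination_by n
decreasing_by exact Nat.div_lt_self (Nat.pos_of_ne_zero (by assumption)) one_lt_two

-- [int(x) for x in bin(int(b))[2:]]  (for b ≥ 0)
def pvBinArray (b : Int) : List Nat :=
  if b.toNat = 0 then [0] else pvBinDigits b.toNat

def sqm (a b n : Int) : Int :=
  (pvBinArray b).foldl
    (fun res i => if i = 1 then PySem.Int.mod (res * res * a) n else PySem.Int.mod (res * res) n) 1

-- while c < p: if sqm(gi, c, p) % p == hi % p: return c; c += 1   (fuel = p - c iterations left)
def loopA (gi hi : Int) : Nat → Int → Int
  | 0, _ => -1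
  | fuel + 1, c =>
      if PySem.Int.mod (sqm gi c pvP) pvP = PySem.Int.mod hi pvP then c
      else loopA gi hi fuel (c + 1)

def calculate_subgrp_congruences (pub : Int) (pi : Int) : Int :=
  let gi := sqm pvAlpha (PySem.Int.floordiv pvQ pi) pvP
  let hi := sqm pvBeta (PySem.Int.floordiv pvQ pi) pvP
  loopA gi hi (pvP - 1).toNat 1

-- ===== PORT B =====
-- while e > 0: if e % 2 == 1: r = r*b%m; b = b*b%m; e //= 2   (e > 0, so / and % are Python's // and %)
def modpowGo (b r e m : Int) : Int :=
  if h : 0 < e then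
    modpowGo (b * b % m) (if e % 2 = 1 then r * b % m else r) (e / 2) m
  else r
termination_by e.toNat
decreasing_by omega

def modpow (b e m : Int) : Int := modpowGo (PySem.Int.mod b m) 1 e m

-- while c < p: if r == hi: return c; r = r*gi%p; c += 1
def loopB (gi hi : Int) : Nat → Int → Int → Int
  | 0, _, _ => -1
  | fuel + 1, r, c =>
      if r = hi then c
      else loopB gi hi fuel (r * gi % pvP) (c + 1)

def calculate_subgrp_congruences_alt (pub : Int) (pi : Int) : Int :=
  let e := PySem.Int.floordiv pvQ pi
  let gi := modpow pvAlpha e pvP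
  let hi := modpow pvBeta e pvP
  loopB gi hi (pvP - 1).toNat gi 1

-- ===== PRECONDITION & SPEC =====
-- A raises on pi = 0 (ZeroDivisionError) and on pi < 0 (q // pi < 0, and sqm's bin()-parse
-- raises ValueError on a negative exponent); Pre_ keeps exactly the inputs where A returns.
def Pre_calculate_subgrp_congruences (pub : Int) (pi : Int) : Prop := 1 ≤ pi
instance (pub : Int) (pi : Int) : Decidable (Pre_calculate_subgrp_congruences pub pi) := by
  unfold Pre_calculate_subgrp_congruences; infer_instance

def pvWitness_calculate_subgrp_congruences : Int × Int := (0, 2)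

def Spec_calculate_subgrp_congruences (pub : Int) (pi : Int) (out : Int) : Prop :=
  out = calculate_subgrp_congruences_alt pub pi
instance (pub : Int) (pi : Int) (out : Int) : Decidable (Spec_calculate_subgrp_congruences pub pi out) := by
  unfold Spec_calculate_subgrp_congruences; infer_instance

-- ===== CLAIM (what is proved, stated in full; the proofs are below) =====
def Claim_equal_calculate_subgrp_congruences : Prop :=
  ∀ (pub : Int) (pi : Int), Dom_calculate_subgrp_congruences pub pi →
    Pre_calculate_subgrp_congruences pub pi →
    Spec_calculate_subgrp_congruences pub pi (calculate_subgrp_congruences pub pi)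

-- ===== LEMMAS AND PROOFS =====

theorem pvP_pos : (0 : Int) < pvP := by unfold pvP; norm_num

-- value of an MSB-first digit list
def pvVal (ds : List Nat) : Nat := ds.foldl (fun a d => 2 * a + d) 0

theorem pvVal_acc (ds : List Nat) : ∀ a : Nat,
    ds.foldl (fun a d => 2 * a + d) a = a * 2 ^ ds.length + pvVal ds := by
  induction ds with
  | nil => intro a; simp [pvVal]
  | cons d ds ih =>
      intro a
      have h2 : pvVal (d :: ds) = d * 2 ^ ds.length + pvVal ds := by
        have := ih d
        simpa [pvVal] using this
      simp only [List.foldl_cons, List.length_cons]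
      rw [ih (2 * a + d), h2, pow_succ]
      ring

theorem pvBinDigits_val (n : Nat) : pvVal (pvBinDigits n) = n := by
  induction n using Nat.strong_induction_on with
  | _ n ih =>
      rw [pvBinDigits]
      split
      · simp [pvVal, *]
      · rename_i h
        have hlt : n / 2 < n := Nat.div_lt_self (Nat.pos_of_ne_zero h) one_lt_two
        have hap : pvVal (pvBinDigits (n / 2) ++ [n % 2])
            = 2 * pvVal (pvBinDigits (n / 2)) + n % 2 := by
          simp [pvVal, List.foldl_append]
        rw [hap, ih _ hlt]
        omega

theorem pvBinDigits_binary (n : Nat) : ∀ d ∈ pvBinDigits n, d = 0 ∨ d = 1 := by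
  induction n using Nat.strong_induction_on with
  | _ n ih =>
      rw [pvBinDigits]
      split
      · simp
      · rename_i h
        intro d hd
        rcases List.mem_append.1 hd with h1 | h1
        · exact ih _ (Nat.div_lt_self (Nat.pos_of_ne_zero h) one_lt_two) d h1
        · simp at h1; omega

-- (x % n) ^ j * y % n = x ^ j * y % n
theorem pv_powmod_mul (n x y : Int) (j : Nat) :
    (x % n) ^ j * y % n = x ^ j * y % n :=
  Int.ModEq.mul (Int.ModEq.pow j (Int.emod_emod_of_dvd x dvd_rfl)) (Int.ModEq.refl y)

-- (x % n) * (y % n) ^ j % n = x * y ^ j % n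
theorem pv_mod_mul_powmod (n x y : Int) (j : Nat) :
    (x % n) * (y % n) ^ j % n = x * y ^ j % n :=
  Int.ModEq.mul (Int.emod_emod_of_dvd x dvd_rfl) (Int.ModEq.pow j (Int.emod_emod_of_dvd y dvd_rfl))

theorem sqm_fold (a n : Int) (hn : 0 < n) :
    ∀ (ds : List Nat), ds ≠ [] → (∀ d ∈ ds, d = 0 ∨ d = 1) → ∀ r : Int,
      ds.foldl (fun res i => if i = 1 then PySem.Int.mod (res * res * a) n
                             else PySem.Int.mod (res * res) n) r
        = (r ^ (2 ^ ds.length) * a ^ pvVal ds) % n := by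
  intro ds
  induction ds with
  | nil => intro h; exact absurd rfl h
  | cons d ds ih =>
      intro _ hbin r
      have hd : d = 0 ∨ d = 1 := hbin d (by simp)
      have step : (if d = 1 then PySem.Int.mod (r * r * a) n else PySem.Int.mod (r * r) n)
          = (r ^ 2 * a ^ d) % n := by
        rcases hd with h | h <;> subst h
        · rw [if_neg (by norm_num), PySem.Int.mod_eq_emod_of_pos hn]
          ring_nf
        · rw [if_pos rfl, PySem.Int.mod_eq_emod_of_pos hn]
          ring_nf
      by_cases hds : ds = []
      · subst hds
        simp only [List.foldl_cons, List.foldl_nil, step]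
        have : pvVal [d] = d := by simp [pvVal]
        rw [this]
        norm_num
      · simp only [List.foldl_cons, step]
        rw [ih hds (fun x hx => hbin x (by simp [hx]))]
        have hval : pvVal (d :: ds) = d * 2 ^ ds.length + pvVal ds := by
          have := pvVal_acc ds d
          simpa [pvVal] using this
        rw [hval, pv_powmod_mul]
        have hexp : (r ^ 2 * a ^ d) ^ 2 ^ ds.length * a ^ pvVal ds
            = r ^ 2 ^ (d :: ds).length * a ^ (d * 2 ^ ds.length + pvVal ds) := by
          rw [List.length_cons, mul_pow, ← pow_mul, ← pow_mul, pow_add, pow_succ, pow_mul]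
          ring
        rw [hexp]

theorem sqm_eq (a b n : Int) (hn : 1 < n) :
    sqm a b n = a ^ b.toNat % n := by
  unfold sqm pvBinArray
  split
  · rename_i h
    rw [h]
    simp only [List.foldl_cons, List.foldl_nil]
    rw [if_neg (by norm_num), PySem.Int.mod_eq_emod_of_pos (by omega)]
    norm_num
  · rename_i h
    rw [sqm_fold a n (by omega) _ (by rw [pvBinDigits]; simp [h]) (pvBinDigits_binary _)]
    rw [pvBinDigits_val, one_pow, one_mul]

theorem modpowGo_eq (m : Int) :
    ∀ (k : Nat) (b r : Int), 0 < k → modpowGo b r (k : Int) m = r * b ^ k % m := by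
  intro k
  induction k using Nat.strong_induction_on with
  | _ k ih =>
      intro b r hk
      rw [modpowGo]
      have hpos : (0 : Int) < (k : Int) := by exact_mod_cast hk
      rw [dif_pos hpos]
      have hdiv : ((k : Int) / 2) = ((k / 2 : Nat) : Int) := by
        omega
      by_cases hk2 : k / 2 = 0
      · -- k = 1
        have hk1 : k = 1 := by omega
        subst hk1
        rw [if_pos (by norm_num), modpowGo]
        norm_num
      · have hlt : k / 2 < k := Nat.div_lt_self hk one_lt_two
        rw [hdiv, ih _ hlt _ _ (Nat.pos_of_ne_zero hk2)]
        by_cases hodd : (k : Int) % 2 = 1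
        · rw [if_pos hodd]
          have hkm : k % 2 = 1 := by omega
          rw [pv_mod_mul_powmod]
          have : r * b * (b * b) ^ (k / 2) = r * b ^ k := by
            conv_rhs => rw [show k = 2 * (k / 2) + 1 by omega]
            rw [pow_add, pow_mul, pow_one]
            ring
          rw [this]
        · rw [if_neg hodd]
          have hkm : k % 2 = 0 := by omega
          have h1 : r * (b * b % m) ^ (k / 2) % m = r * (b * b) ^ (k / 2) % m :=
            Int.ModEq.mul (Int.ModEq.refl r) (Int.ModEq.pow _ (Int.emod_emod_of_dvd _ dvd_rfl))
          rw [h1]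
          have : r * (b * b) ^ (k / 2) = r * b ^ k := by
            conv_rhs => rw [show k = 2 * (k / 2) by omega]
            rw [pow_mul]
            ring
          rw [this]

theorem modpow_eq (b e : Int) (he : 0 ≤ e) :
    modpow b e pvP = b ^ e.toNat % pvP := by
  unfold modpow
  rw [PySem.Int.mod_eq_emod_of_pos pvP_pos]
  by_cases h0 : e = 0
  · subst h0
    rw [modpowGo]
    norm_num
    unfold pvP
    decide
  · have hk : 0 < e.toNat := by omega
    have hcast : e = ((e.toNat : Nat) : Int) := by omega
    rw [hcast, modpowGo_eq pvP _ _ _ hk, one_mul, Int.toNat_natCast]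
    exact Int.ModEq.pow _ (Int.emod_emod_of_dvd b dvd_rfl)

theorem loop_eq (G H : Int) (hH0 : 0 ≤ H) (hH1 : H < pvP) :
    ∀ (fuel : Nat) (c : Int), 0 ≤ c →
      loopA G H fuel c = loopB G H fuel (G ^ c.toNat % pvP) c := by
  intro fuel
  induction fuel with
  | zero => intro c _; rfl
  | succ fuel ih =>
      intro c hc
      simp only [loopA, loopB]
      have hA : PySem.Int.mod (sqm G c pvP) pvP = G ^ c.toNat % pvP := by
        rw [sqm_eq G c pvP (by unfold pvP; norm_num),
          PySem.Int.mod_eq_emod_of_pos pvP_pos, Int.emod_emod_of_dvd _ dvd_rfl]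
      have hB : PySem.Int.mod H pvP = H := by
        rw [PySem.Int.mod_eq_emod_of_pos pvP_pos]
        exact Int.emod_eq_of_lt hH0 hH1
      rw [hA, hB]
      by_cases hcond : G ^ c.toNat % pvP = H
      · rw [if_pos hcond, if_pos hcond]
      · rw [if_neg hcond, if_neg hcond]
        have hr : G ^ c.toNat % pvP * G % pvP = G ^ (c + 1).toNat % pvP := by
          have h1 : (c + 1).toNat = c.toNat + 1 := by omega
          have h2 : G ^ c.toNat % pvP * G % pvP = G ^ c.toNat * G % pvP :=
            Int.ModEq.mul (Int.emod_emod_of_dvd _ dvd_rfl) (Int.ModEq.refl G)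
          rw [h2, h1, pow_succ]
        rw [hr]
        exact ih (c + 1) (by omega)

-- ===== VERDICT (by name: the statement is the Claim_ definition above) =====
theorem calculate_subgrp_congruences_spec : Claim_equal_calculate_subgrp_congruences := by
  intro pub pi _ hpre
  unfold Pre_calculate_subgrp_congruences at hpre
  unfold Spec_calculate_subgrp_congruences
  unfold calculate_subgrp_congruences calculate_subgrp_congruences_alt
  have hpi : (0 : Int) < pi := by omega
  have he : 0 ≤ PySem.Int.floordiv pvQ pi := by
    rw [PySem.Int.floordiv_eq_ediv_of_pos hpi]
    exact Int.ediv_nonneg (by unfold pvQ; norm_num) (by omega)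
  set e := PySem.Int.floordiv pvQ pi with hedef
  have hgA : sqm pvAlpha e pvP = pvAlpha ^ e.toNat % pvP := sqm_eq _ _ _ (by unfold pvP; norm_num)
  have hhA : sqm pvBeta e pvP = pvBeta ^ e.toNat % pvP := sqm_eq _ _ _ (by unfold pvP; norm_num)
  have hgB : modpow pvAlpha e pvP = pvAlpha ^ e.toNat % pvP := modpow_eq _ _ he
  have hhB : modpow pvBeta e pvP = pvBeta ^ e.toNat % pvP := modpow_eq _ _ he
  simp only [hgA, hhA, hgB, hhB]
  set G := pvAlpha ^ e.toNat % pvP with hGdef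
  set H := pvBeta ^ e.toNat % pvP with hHdef
  have hG0 : 0 ≤ G := Int.emod_nonneg _ (by unfold pvP; norm_num)
  have hG1 : G < pvP := Int.emod_lt_of_pos _ pvP_pos
  have hH0 : 0 ≤ H := Int.emod_nonneg _ (by unfold pvP; norm_num)
  have hH1 : H < pvP := Int.emod_lt_of_pos _ pvP_pos
  have hG1pow : G ^ (1 : Int).toNat % pvP = G := by
    simp [Int.emod_eq_of_lt hG0 hG1]
  rw [loop_eq G H hH0 hH1 _ 1 (by omega), hG1pow]
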